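-- pv_equiv track=rewrite | github.com/COLA-Laboratory/PrismBO | EXP_open/EXP_flash.py | policy2
-- ===== SOURCE A (Python) =====
-- def policy2(scores, lives=3):
--     """
--     No improvement in last 3 runs
--     """
--     temp_lives = lives
--     last = scores[0]
--     for i, score in enumerate(scores):
--         if i > 0:
--             if temp_lives == 0:
--                 return i
--             elif score >= last:
--                 temp_lives -= 1
--                 last = score
--             else:
--                 last = score
--     return -1
-- ===== SOURCE B (Python) =====
-- def policy2(scores, lives=3):
--     # counts[k] = number of non-improving steps seen before comparing pair k;
--     # the answer is one past the first pair where that count hits `lives`.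
--     counts = []
--     c = 0
--     for prev, cur in zip(scores, scores[1:]):
--         counts.append(c)
--         c += cur >= prev
--     if lives in counts:
--         return counts.index(lives) + 1
--     return -1
-- ===== Notes on version B (the rewrite author's own statement) =====
-- stated objective: alternative
-- what changed: A's stateful early-exit scan with a decrementing lives counter is replaced by building the table of prefix non-improvement counts over zip(scores, scores[1:]) and answering with a first-occurrence lookup counts.index(lives)+1; Pre_ excludes only the empty list, on which A raises IndexError reading the first element.
import Mathlib
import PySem

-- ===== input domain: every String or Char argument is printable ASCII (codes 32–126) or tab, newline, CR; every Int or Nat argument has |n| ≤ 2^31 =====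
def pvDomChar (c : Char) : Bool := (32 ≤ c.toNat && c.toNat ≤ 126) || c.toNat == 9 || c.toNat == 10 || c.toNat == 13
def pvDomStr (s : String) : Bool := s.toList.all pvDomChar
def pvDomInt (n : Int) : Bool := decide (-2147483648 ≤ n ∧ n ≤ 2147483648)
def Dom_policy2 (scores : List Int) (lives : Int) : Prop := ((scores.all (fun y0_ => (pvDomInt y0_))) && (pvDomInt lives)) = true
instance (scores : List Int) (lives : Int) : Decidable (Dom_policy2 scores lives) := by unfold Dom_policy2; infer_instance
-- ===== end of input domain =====

-- B replaces A's stateful early-exit scan (decrementing lives counter) by a prefix-count table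
-- over adjacent pairs plus a first-occurrence index lookup; equal return values are proved on
-- non-empty scores, where A raises IndexError.

-- ===== PORT A =====
-- the for-loop of A: state (temp_lives, last), early return = value of the recursion
def policy2Go : List (Int × Int) → Int → Int → Int
  | [], _tl, _last => -1
  | (i, score) :: rest, tl, last =>
    if i > 0 then
      if tl = 0 then i
      else if score ≥ last then policy2Go rest (tl - 1) score
      else policy2Go rest tl score
    else policy2Go rest tl last

def policy2 (scores : List Int) (lives : Int) : Int :=
  match PySem.List.pyGet? scores 0 with
  | none => 0  -- the first-element read raises IndexError here (empty list); excluded by Pre_policy2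
  | some last => policy2Go (PySem.List.enumerate scores 0) lives last

-- ===== PORT B =====
def policy2_alt (scores : List Int) (lives : Int) : Int :=
  let st := (scores.zip (PySem.List.slice scores (some 1) none)).foldl
      (fun (st : List Int × Int) p =>
        (st.1 ++ [st.2], st.2 + (if p.2 ≥ p.1 then 1 else 0))) ([], 0)
  let counts := st.1
  if counts.contains lives then
    match PySem.List.index? counts lives with
    | some k => (k : Int) + 1
    | none => -1  -- unreachable: lives ∈ counts
  else -1

-- ===== PRECONDITION & SPEC =====
-- Pre_ excludes only the empty list, on which A raises IndexError reading the first element.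
def Pre_policy2 (scores : List Int) (lives : Int) : Prop := scores ≠ []
instance (scores : List Int) (lives : Int) : Decidable (Pre_policy2 scores lives) := by
  unfold Pre_policy2; infer_instance
def pvWitness_policy2 : List Int × Int := ([5, 4, 4, 6, 2], 3)


def Spec_policy2 (scores : List Int) (lives : Int) (out : Int) : Prop := out = policy2_alt scores lives
instance (scores : List Int) (lives : Int) (out : Int) : Decidable (Spec_policy2 scores lives out) := by unfold Spec_policy2; infer_instance

-- ===== CLAIM (what is proved, stated in full; the proofs are below) =====
def Claim_equal_policy2 : Prop := ∀ (scores : List Int) (lives : Int), Dom_policy2 scores lives → Pre_policy2 scores lives → Spec_policy2 scores lives (policy2 scores lives)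

-- ===== LEMMAS AND PROOFS =====

-- position (0-based, among the adjacent pairs) of the first check where the counter hits 0,
-- shared characterisation of both ports
def myIdx : Int → List (Int × Int) → Option Nat
  | _, [] => none
  | tl, p :: ps => if tl = 0 then some 0
                   else (myIdx (tl - (if p.2 ≥ p.1 then 1 else 0)) ps).map (· + 1)

-- prefix non-improvement counts, starting count c
def cnts : Int → List (Int × Int) → List Int
  | _, [] => []
  | c, p :: ps => c :: cnts (c + (if p.2 ≥ p.1 then 1 else 0)) ps

theorem go_eq_myIdx (xs : List Int) : ∀ (i prev tl : Int), 0 < i →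
    policy2Go (PySem.List.enumerate xs i) tl prev =
      match myIdx tl ((prev :: xs).zip xs) with
      | some k => i + (k : Int)
      | none => -1 := by
  induction xs with
  | nil => intro i prev tl _; simp [PySem.List.enumerate_nil, policy2Go, myIdx]
  | cons x xs ih =>
    intro i prev tl hi
    simp only [PySem.List.enumerate_cons, policy2Go, hi, if_true, List.zip_cons_cons, myIdx]
    by_cases h0 : tl = 0
    · simp [h0]
    · by_cases hx : x ≥ prev
      · simp only [h0, hx, if_false, if_true, ih (i+1) x (tl-1) (by omega)]
        cases myIdx (tl - 1) ((x :: xs).zip xs) with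
        | none => simp
        | some k => simp; ring
      · simp only [h0, hx, if_false, sub_zero, ih (i+1) x tl (by omega)]
        cases myIdx tl ((x :: xs).zip xs) with
        | none => simp
        | some k => simp; ring

theorem index?_cnts (ps : List (Int × Int)) : ∀ (c lives : Int),
    PySem.List.index? (cnts c ps) lives = myIdx (lives - c) ps := by
  induction ps with
  | nil => intro c lives; simp [cnts, myIdx, PySem.List.index?_eq_idxOf?]
  | cons p ps ih =>
    intro c lives
    simp only [cnts, myIdx]
    by_cases h : lives - c = 0
    · have hc : c = lives := by omega
      rw [if_pos h, hc, PySem.List.index?_cons_self]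
    · have hc : c ≠ lives := by omega
      rw [PySem.List.index?_cons_of_ne _ hc, ih, if_neg h]
      congr 1
      ring

theorem foldl_cnts (ps : List (Int × Int)) : ∀ (acc : List Int) (c : Int),
    (ps.foldl (fun (st : List Int × Int) p =>
        (st.1 ++ [st.2], st.2 + (if p.2 ≥ p.1 then 1 else 0))) (acc, c)).1
      = acc ++ cnts c ps := by
  induction ps with
  | nil => intro acc c; simp [cnts]
  | cons p ps ih => intro acc c; simp [cnts, List.foldl_cons, ih]

-- ===== VERDICT (by name: the statement is the Claim_ definition above) =====
theorem policy2_spec : Claim_equal_policy2 := by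
  intro scores lives _dom hpre
  unfold Spec_policy2
  obtain ⟨s0, rest, rfl⟩ : ∃ a l, scores = a :: l := by
    cases scores with
    | nil => exact absurd rfl hpre
    | cons a l => exact ⟨a, l, rfl⟩
  unfold policy2 policy2_alt
  rw [PySem.List.slice_from_one]
  simp only [PySem.List.pyGet?_zero_cons, PySem.List.enumerate_cons, List.tail_cons, zero_add]
  rw [show policy2Go ((0, s0) :: PySem.List.enumerate rest 1) lives s0 =
      policy2Go (PySem.List.enumerate rest 1) lives s0 by simp [policy2Go]]
  rw [go_eq_myIdx rest 1 s0 lives (by omega)]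
  rw [foldl_cnts _ [] 0]
  simp only [List.nil_append]
  have hidx := index?_cnts ((s0 :: rest).zip rest) 0 lives
  rw [show lives - 0 = lives from by ring] at hidx
  by_cases hmem : lives ∈ cnts 0 ((s0 :: rest).zip rest)
  · have hcont : (cnts 0 ((s0 :: rest).zip rest)).contains lives = true := by
      simpa using hmem
    rw [if_pos hcont, hidx]
    obtain ⟨k, hk⟩ := Option.isSome_iff_exists.mp
      ((PySem.List.index?_isSome_iff _ _).mpr hmem)
    rw [hidx] at hk
    rw [hk]
    push_cast; ring
  · have hcont : ¬ (cnts 0 ((s0 :: rest).zip rest)).contains lives = true := by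
      simpa using hmem
    rw [if_neg hcont]
    have : myIdx lives ((s0 :: rest).zip rest) = none := by
      rw [← hidx, PySem.List.index?_eq_none_iff]; exact hmem
    rw [this]
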